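-- pv_equiv track=rewrite | github.com/imrishi007/financial-document-analysis | scripts/run_phase9_strategic.py | split_by_date
-- ===== SOURCE A (Python) =====
-- def split_by_date(dates, labels):
--     """Temporal split: train<=2022, val=2023, test>=2024."""
--     train, val, test = [], [], []
--     for i, d in enumerate(dates):
--         if labels[i] < 0:
--             continue
--         if d <= "2022-12-31":
--             train.append(i)
--         elif d <= "2023-12-31":
--             val.append(i)
--         else:
--             test.append(i)
--     return train, val, test
-- ===== SOURCE B (Python) =====
-- def split_by_date(dates, labels):
--     """Temporal split: train<=2022, val=2023, test>=2024."""
--     train = [i for i, d in enumerate(dates) if labels[i] >= 0 and d <= "2022-12-31"]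
--     val = [i for i, d in enumerate(dates) if labels[i] >= 0 and "2022-12-31" < d <= "2023-12-31"]
--     test = [i for i, d in enumerate(dates) if labels[i] >= 0 and d > "2023-12-31"]
--     return train, val, test
-- ===== Notes on version B (the rewrite author's own statement) =====
-- stated objective: idiomatic
-- what changed: The single classifying loop with three mutable accumulators is replaced by three independent filtered comprehensions over enumerate(dates), one per mutually-exclusive date band.
import Mathlib
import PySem

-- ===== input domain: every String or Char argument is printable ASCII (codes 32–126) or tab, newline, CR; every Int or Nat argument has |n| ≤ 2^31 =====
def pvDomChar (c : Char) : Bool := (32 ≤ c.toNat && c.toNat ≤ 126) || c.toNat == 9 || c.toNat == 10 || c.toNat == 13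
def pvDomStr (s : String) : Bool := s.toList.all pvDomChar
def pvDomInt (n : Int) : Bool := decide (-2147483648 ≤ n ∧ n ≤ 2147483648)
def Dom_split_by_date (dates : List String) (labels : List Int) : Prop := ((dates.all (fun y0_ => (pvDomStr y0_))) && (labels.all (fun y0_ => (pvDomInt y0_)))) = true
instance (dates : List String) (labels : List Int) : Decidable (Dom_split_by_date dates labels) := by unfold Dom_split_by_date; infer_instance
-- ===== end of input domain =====

-- B replaces A's single classifying loop by three independent filtered scans (idiomatic; same cost).

-- ===== PORT A =====
-- single loop over enumerate(dates), appending i to one of three accumulators;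
-- labels[i] is ported with pyGetD (exact under Pre_, which guarantees the index is in range)
def split_by_date (dates : List String) (labels : List Int) : List Int × List Int × List Int :=
  (PySem.List.enumerate dates).foldl
    (fun acc p =>
      if PySem.List.pyGetD labels p.1 0 < 0 then acc
      else if p.2 ≤ "2022-12-31" then (acc.1 ++ [p.1], acc.2.1, acc.2.2)
      else if p.2 ≤ "2023-12-31" then (acc.1, acc.2.1 ++ [p.1], acc.2.2)
      else (acc.1, acc.2.1, acc.2.2 ++ [p.1]))
    ([], [], [])

-- ===== PORT B =====
-- three independent comprehensions over enumerate(dates), one per date band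
def split_by_date_alt (dates : List String) (labels : List Int) : List Int × List Int × List Int :=
  ((PySem.List.enumerate dates).filterMap (fun p =>
      if 0 ≤ PySem.List.pyGetD labels p.1 0 ∧ p.2 ≤ "2022-12-31" then some p.1 else none),
   (PySem.List.enumerate dates).filterMap (fun p =>
      if 0 ≤ PySem.List.pyGetD labels p.1 0 ∧ "2022-12-31" < p.2 ∧ p.2 ≤ "2023-12-31" then some p.1 else none),
   (PySem.List.enumerate dates).filterMap (fun p =>
      if 0 ≤ PySem.List.pyGetD labels p.1 0 ∧ "2023-12-31" < p.2 then some p.1 else none))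

-- ===== PRECONDITION & SPEC =====
-- Pre_ excludes inputs where labels is shorter than dates: there both Pythons raise IndexError on labels[i].
def Pre_split_by_date (dates : List String) (labels : List Int) : Prop :=
  dates.length ≤ labels.length
instance (dates : List String) (labels : List Int) : Decidable (Pre_split_by_date dates labels) := by unfold Pre_split_by_date; infer_instance
def pvWitness_split_by_date : List String × List Int :=
  (["2022-01-01", "2023-06-01", "2024-02-02"], [1, 0, -1])

def Spec_split_by_date (dates : List String) (labels : List Int) (out : List Int × List Int × List Int) : Prop := out = split_by_date_alt dates labels
instance (dates : List String) (labels : List Int) (out : List Int × List Int × List Int) : Decidable (Spec_split_by_date dates labels out) := by unfold Spec_split_by_date; infer_instance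

-- ===== CLAIM (what is proved, stated in full; the proofs are below) =====
def Claim_equal_split_by_date : Prop := ∀ (dates : List String) (labels : List Int), Dom_split_by_date dates labels → Pre_split_by_date dates labels → Spec_split_by_date dates labels (split_by_date dates labels)

-- ===== LEMMAS AND PROOFS =====

-- loop invariant: A's fold with accumulators (t, v, s) over any pair list l equals
-- the three filters of l appended to the accumulators
lemma fold_eq_filters (labels : List Int) (l : List (Int × String)) (t v s : List Int) :
    l.foldl
      (fun acc p =>
        if PySem.List.pyGetD labels p.1 0 < 0 then acc
        else if p.2 ≤ "2022-12-31" then (acc.1 ++ [p.1], acc.2.1, acc.2.2)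
        else if p.2 ≤ "2023-12-31" then (acc.1, acc.2.1 ++ [p.1], acc.2.2)
        else (acc.1, acc.2.1, acc.2.2 ++ [p.1]))
      (t, v, s)
    =
    (t ++ l.filterMap (fun p =>
        if 0 ≤ PySem.List.pyGetD labels p.1 0 ∧ p.2 ≤ "2022-12-31" then some p.1 else none),
     v ++ l.filterMap (fun p =>
        if 0 ≤ PySem.List.pyGetD labels p.1 0 ∧ "2022-12-31" < p.2 ∧ p.2 ≤ "2023-12-31" then some p.1 else none),
     s ++ l.filterMap (fun p =>
        if 0 ≤ PySem.List.pyGetD labels p.1 0 ∧ "2023-12-31" < p.2 then some p.1 else none)) := by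
  have hlt : ("2022-12-31" : String) < "2023-12-31" := by simp; decide
  induction l generalizing t v s with
  | nil => simp
  | cons p l ih =>
    simp only [List.foldl_cons, List.filterMap_cons]
    by_cases hneg : PySem.List.pyGetD labels p.1 0 < 0
    · rw [if_pos hneg,
        if_neg (fun h => absurd h.1 (by omega)),
        if_neg (fun h => absurd h.1 (by omega)),
        if_neg (fun h => absurd h.1 (by omega))]
      exact ih t v s
    · have h0 : 0 ≤ PySem.List.pyGetD labels p.1 0 := by omega
      rw [if_neg hneg]
      by_cases h1 : p.2 ≤ "2022-12-31"
      · rw [if_pos h1, if_pos ⟨h0, h1⟩,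
          if_neg (fun h => absurd h1 (not_le.mpr h.2.1)),
          if_neg (fun h => absurd (lt_of_lt_of_le h.2 h1) (not_lt.mpr (le_of_lt hlt)))]
        rw [ih (t ++ [p.1]) v s]
        simp
      · have h1' : "2022-12-31" < p.2 := not_le.mp h1
        rw [if_neg h1]
        by_cases h2 : p.2 ≤ "2023-12-31"
        · rw [if_pos h2,
            if_neg (fun h => absurd h.2 h1),
            if_pos ⟨h0, h1', h2⟩,
            if_neg (fun h => absurd h.2 (not_lt.mpr h2))]
          rw [ih t (v ++ [p.1]) s]
          simp
        · have h2' : "2023-12-31" < p.2 := not_le.mp h2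
          rw [if_neg h2,
            if_neg (fun h => absurd h.2 h1),
            if_neg (fun h => absurd h.2.2 h2),
            if_pos ⟨h0, h2'⟩]
          rw [ih t v (s ++ [p.1])]
          simp

-- ===== VERDICT (by name: the statement is the Claim_ definition above) =====
theorem split_by_date_spec : Claim_equal_split_by_date := by
  intro dates labels _ _
  unfold Spec_split_by_date split_by_date split_by_date_alt
  simpa using fold_eq_filters labels (PySem.List.enumerate dates) [] [] []
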